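-- pv_equiv track=rewrite | github.com/egorvts/Kattis | EmPleh/slow_solution.py | row_to_full_row
-- ===== SOURCE A (Python) =====
-- def row_to_full_row(row: list, isWhiteFirst: bool) -> str:
--
--     white_row = [i for i in "|" + "...|:::|" * 4 + "\n"]
--     black_row = [i for i in "|" + ":::|...|" * 4 + "\n"]
--
--     if isWhiteFirst:
--         for i in range(2, 32, 4):
--             white_row[i] = row[0]
--             row.pop(0)
--         return "".join(white_row)
--     else:
--         for i in range(2, 32, 4):
--             black_row[i] = row[0]
--             row.pop(0)
--         return "".join(black_row)
-- ===== SOURCE B (Python) =====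
-- def row_to_full_row(row: list, isWhiteFirst: bool) -> str:
--     cells = []
--     for i in range(8):
--         bg = '.' if (i % 2 == 0) == isWhiteFirst else ':'
--         cells.append(bg + row.pop(0) + bg)
--     return '|' + '|'.join(cells) + '|\n'
-- ===== Notes on version B (the rewrite author's own statement) =====
-- stated objective: simpler
-- what changed: B drops the two prebuilt 33-character template lists and the index-overwriting loop; it builds the row cell-by-cell with a single parity-computed background and joins the cells.
import Mathlib
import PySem

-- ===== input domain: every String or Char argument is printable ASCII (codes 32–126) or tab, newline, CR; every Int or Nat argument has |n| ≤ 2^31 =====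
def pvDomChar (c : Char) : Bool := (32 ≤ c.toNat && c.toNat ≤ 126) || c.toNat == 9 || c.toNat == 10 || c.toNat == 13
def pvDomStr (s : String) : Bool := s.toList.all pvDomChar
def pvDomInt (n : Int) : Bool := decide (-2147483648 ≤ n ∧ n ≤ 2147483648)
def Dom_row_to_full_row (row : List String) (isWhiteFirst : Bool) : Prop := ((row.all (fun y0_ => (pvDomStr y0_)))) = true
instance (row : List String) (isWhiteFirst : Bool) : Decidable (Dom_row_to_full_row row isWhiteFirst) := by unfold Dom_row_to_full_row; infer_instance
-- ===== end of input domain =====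

-- B builds the row cell-by-cell from a parity-computed background instead of overwriting
-- fixed indices of two prebuilt templates (objective: simpler). Both A and B pop the first
-- 8 elements off `row` in place; the theorems here are about the return value only.

-- ===== PORT A =====
-- "|" + "...|:::|" * 4 + "\n"  /  "|" + ":::|...|" * 4 + "\n",  as lists of 1-char strings
def pvWhiteTemplate : List String :=
  ('|' :: (List.replicate 4 "...|:::|".toList).flatten ++ ['\n']).map (fun c => String.ofList [c])
def pvBlackTemplate : List String :=
  ('|' :: (List.replicate 4 ":::|...|".toList).flatten ++ ['\n']).map (fun c => String.ofList [c])

-- the for-loop: state = (template being overwritten, remaining row); row[0] / row.pop(0)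
def pvFillLoop (tpl row : List String) : List String :=
  ((PySem.List.pyRange 2 32 4).foldl
    (fun (st : List String × List String) i => (st.1.set i.toNat (st.2.headD ""), st.2.tail))
    (tpl, row)).1

def row_to_full_row (row : List String) (isWhiteFirst : Bool) : String :=
  if isWhiteFirst then PySem.Str.join "" (pvFillLoop pvWhiteTemplate row)
  else PySem.Str.join "" (pvFillLoop pvBlackTemplate row)

-- ===== PORT B =====
-- loop i in range(8): bg from parity, cell = bg + row.pop(0) + bg; join the cells
def row_to_full_row_alt (row : List String) (isWhiteFirst : Bool) : String :=
  let st := (PySem.List.pyRange 0 8 1).foldl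
    (fun (st : List String × List String) i =>
      let bg : String := if ((PySem.Int.mod i 2 == 0) == isWhiteFirst) then "." else ":"
      (st.1 ++ [bg ++ st.2.headD "" ++ bg], st.2.tail))
    ([], row)
  "|" ++ PySem.Str.join "|" st.1 ++ "|" ++ "\n"

-- ===== PRECONDITION & SPEC =====
-- Pre_: row[0] / row.pop(0) raises IndexError in A (and in B) once fewer than 8 pieces remain.
def Pre_row_to_full_row (row : List String) (isWhiteFirst : Bool) : Prop := 8 ≤ row.length
instance (row : List String) (isWhiteFirst : Bool) : Decidable (Pre_row_to_full_row row isWhiteFirst) := by unfold Pre_row_to_full_row; infer_instance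
def pvWitness_row_to_full_row : List String × Bool := (["r","n","b","q","k","b","n","r"], true)

def Spec_row_to_full_row (row : List String) (isWhiteFirst : Bool) (out : String) : Prop := out = row_to_full_row_alt row isWhiteFirst
instance (row : List String) (isWhiteFirst : Bool) (out : String) : Decidable (Spec_row_to_full_row row isWhiteFirst out) := by unfold Spec_row_to_full_row; infer_instance

-- ===== CLAIM (what is proved, stated in full; the proofs are below) =====
def Claim_equal_row_to_full_row : Prop := ∀ (row : List String) (isWhiteFirst : Bool), Dom_row_to_full_row row isWhiteFirst → Pre_row_to_full_row row isWhiteFirst → Spec_row_to_full_row row isWhiteFirst (row_to_full_row row isWhiteFirst)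

-- ===== LEMMAS AND PROOFS =====

theorem row_to_full_row_agree (a b c d e f g h : String) (rest : List String) (w : Bool) :
    row_to_full_row (a::b::c::d::e::f::g::h::rest) w
      = row_to_full_row_alt (a::b::c::d::e::f::g::h::rest) w := by
  apply String.ext
  cases w <;>
    simp [row_to_full_row, row_to_full_row_alt, pvFillLoop, pvWhiteTemplate, pvBlackTemplate,
      PySem.List.pyRange_of_pos, List.range_succ, PySem.Str.toList_join, PySem.Chars.join,
      PySem.Int.mod, String.toList_append, List.intercalate,
      List.intersperse]

-- ===== VERDICT (by name: the statement is the Claim_ definition above) =====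
theorem row_to_full_row_spec : Claim_equal_row_to_full_row := by
  intro row w _ hpre
  unfold Spec_row_to_full_row
  match row, hpre with
  | a::b::c::d::e::f::g::h::rest, _ => exact row_to_full_row_agree a b c d e f g h rest w
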